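-- pv_equiv track=rewrite | github.com/dev2pew/promptify | src/promptify/core/mods.py | unescape_git_branch_name
-- ===== SOURCE A (Python) =====
-- def unescape_git_branch_name(branch: str) -> str:
--     """Decode a branch name previously escaped for the Git mention grammar"""
--     decoded: list[str] = []
--     escaped = False
--     for char in branch:
--         if escaped:
--             decoded.append(char)
--             escaped = False
--             continue
--         if char == "\\":
--             escaped = True
--             continue
--         decoded.append(char)
--     if escaped:
--         decoded.append("\\")
--     return "".join(decoded)
-- ===== SOURCE B (Python) =====
-- import re
--
-- def unescape_git_branch_name(branch: str) -> str:
--     """Decode a branch name previously escaped for the Git mention grammar"""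
--     return re.sub(r"\\(.)", lambda m: m.group(1), branch, flags=re.DOTALL)
-- ===== Notes on version B (the rewrite author's own statement) =====
-- stated objective: idiomatic
-- what changed: Replaced the explicit escape-state accumulator loop with a single regex substitution (re.sub of backslash+any-char pairs, DOTALL), letting the regex engine drive the traversal; a lone trailing backslash is untouched, as in A.
import Mathlib
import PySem

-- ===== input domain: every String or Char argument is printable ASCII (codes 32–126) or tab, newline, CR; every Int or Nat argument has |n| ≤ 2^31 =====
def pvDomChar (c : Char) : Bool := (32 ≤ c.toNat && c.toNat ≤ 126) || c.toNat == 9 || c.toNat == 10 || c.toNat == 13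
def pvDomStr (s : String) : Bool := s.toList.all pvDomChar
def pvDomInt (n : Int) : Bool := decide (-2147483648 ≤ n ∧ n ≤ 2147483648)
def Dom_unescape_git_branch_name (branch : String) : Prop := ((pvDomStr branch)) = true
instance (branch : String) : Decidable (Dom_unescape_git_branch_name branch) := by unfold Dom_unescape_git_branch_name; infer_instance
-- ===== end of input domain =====

-- B decodes by one regex-style pass over backslash+char pairs instead of A's explicit escape-state loop; objective: idiomatic.


-- ===== PORT A =====
-- A's loop: state is (decoded so far, escaped flag); branches in source order.
def pvAStep (st : List Char × Bool) (c : Char) : List Char × Bool :=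
  if st.2 then (st.1 ++ [c], false)
  else if c = '\\' then (st.1, true)
  else (st.1 ++ [c], false)

def unescape_git_branch_name (branch : String) : String :=
  let st := branch.toList.foldl pvAStep ([], false)
  let decoded := if st.2 then st.1 ++ ['\\'] else st.1
  String.mk decoded

-- ===== PORT B =====
-- B's regex re.sub(r"\\(.)", \1, DOTALL): the engine scans left to right, replacing each
-- backslash+char pair by the char and copying any other char (a lone trailing backslash stays).
def pvRegexSub : List Char → List Char
  | [] => []
  | '\\' :: c :: rest => c :: pvRegexSub rest
  | c :: rest => c :: pvRegexSub rest

def unescape_git_branch_name_alt (branch : String) : String :=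
  String.mk (pvRegexSub branch.toList)

-- ===== PRECONDITION & SPEC =====
def Spec_unescape_git_branch_name (branch : String) (out : String) : Prop := out = unescape_git_branch_name_alt branch
instance (branch : String) (out : String) : Decidable (Spec_unescape_git_branch_name branch out) := by unfold Spec_unescape_git_branch_name; infer_instance

-- ===== CLAIM (what is proved, stated in full; the proofs are below) =====
def Claim_equal_unescape_git_branch_name : Prop := ∀ (branch : String), Dom_unescape_git_branch_name branch → Spec_unescape_git_branch_name branch (unescape_git_branch_name branch)

-- ===== LEMMAS AND PROOFS =====
-- Finishing step of A: flush a pending backslash.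
def pvAFinish (st : List Char × Bool) : List Char :=
  if st.2 then st.1 ++ ['\\'] else st.1

theorem pvA_key : ∀ (l : List Char) (acc : List Char),
    pvAFinish (l.foldl pvAStep (acc, false)) = acc ++ pvRegexSub l := by
  intro l
  induction l using pvRegexSub.induct with
  | case1 => intro acc; simp [pvAFinish, pvRegexSub]
  | case2 c rest ih =>
      intro acc
      simp only [List.foldl, pvAStep, pvRegexSub]
      simpa using ih (acc ++ [c])
  | case3 c rest h ih =>
      intro acc
      by_cases hc : c = '\\'
      · -- then rest = [] (otherwise case2 would have matched)
        subst hc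
        cases rest with
        | nil => simp [pvAFinish, pvAStep, pvRegexSub]
        | cons d tl => exact absurd (h d tl rfl rfl) id
      · have hr : pvRegexSub (c :: rest) = c :: pvRegexSub rest := by
          rw [pvRegexSub.eq_def]
          split
          · rename_i heq; cases heq
          · rename_i heq; injection heq with h1 _; exact absurd h1.symm (fun h' => hc h'.symm)
          · rename_i heq; injection heq with h1 h2; rw [h1, h2]
        rw [hr]
        simp only [List.foldl, pvAStep, if_neg hc]
        simpa using ih (acc ++ [c])

-- ===== VERDICT (by name: the statement is the Claim_ definition above) =====
theorem unescape_git_branch_name_spec : Claim_equal_unescape_git_branch_name := by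
  intro branch _
  unfold Spec_unescape_git_branch_name unescape_git_branch_name unescape_git_branch_name_alt
  have := pvA_key branch.toList []
  simp only [pvAFinish] at this
  simp [this]
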